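-- pv_equiv track=rewrite | github.com/SimonSubrini/Weekly-Challenge-2022-Python | app/src/main/java/com/mouredev/weeklychallenge2022/Challenge28.py | vendingMachine
-- ===== SOURCE A (Python) =====
-- def vendingMachine(coinList,product):
--     acceptedMoneyValues=[200,100,50,10,5]
--     products={
--         1:["Agua", 50],2:["Coca-Cola", 100],4:["Cerveza", 155],5:["Pizza", 200],10:["Donut", 75]
--     }
--     if product not in products:
--         return "El producto con codigo {} no existe".format(product),coinList
--
--
--     money=0
--     for coin in coinList:
--         if coin not in acceptedMoneyValues:
--             return "Error, se ha ingresado una moneda no permitida",coinList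
--         money+=coin
--
--     if money<products[product][1]:
--         return "Dinero insuficiente para realizar la compra (dinero disponible: {}, precio: {})".format(money,products[product][1]),coinList
--     else:
--         money=money-products[product][1]
--         moneyCont=0
--         moneyBackList=[]
--         while money>0:
--             if money-acceptedMoneyValues[moneyCont]>=0:
--                 moneyBackList.append(acceptedMoneyValues[moneyCont])
--                 money-=acceptedMoneyValues[moneyCont]
--             else:
--                 moneyCont+=1
--         return "Producto adquirido --> {}, vuelto --> {}".format(products[product][0],moneyBackList),moneyBackList
-- ===== SOURCE B (Python) =====
-- def vendingMachine(coinList, product):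
--     acceptedMoneyValues = [200, 100, 50, 10, 5]
--     products = {
--         1: ["Agua", 50], 2: ["Coca-Cola", 100], 4: ["Cerveza", 155], 5: ["Pizza", 200], 10: ["Donut", 75]
--     }
--     if product not in products:
--         return "El producto con codigo {} no existe".format(product), coinList
--     if any(coin not in acceptedMoneyValues for coin in coinList):
--         return "Error, se ha ingresado una moneda no permitida", coinList
--     money = sum(coinList)
--     name, price = products[product]
--     if money < price:
--         return "Dinero insuficiente para realizar la compra (dinero disponible: {}, precio: {})".format(money, price), coinList
--     moneyBackList = []
--     rest = money - price
--     for value in acceptedMoneyValues: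
--         count, rest = divmod(rest, value)
--         moneyBackList.extend([value] * count)
--     return "Producto adquirido --> {}, vuelto --> {}".format(name, moneyBackList), moneyBackList
-- ===== Notes on version B (the rewrite author's own statement) =====
-- stated objective: simpler
-- what changed: The coin validation becomes a single any() check with sum() for the total, and the repeated-subtraction while-loop with a moving denomination pointer is replaced by one divmod per denomination that emits [value]*count at once.
import Mathlib
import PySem

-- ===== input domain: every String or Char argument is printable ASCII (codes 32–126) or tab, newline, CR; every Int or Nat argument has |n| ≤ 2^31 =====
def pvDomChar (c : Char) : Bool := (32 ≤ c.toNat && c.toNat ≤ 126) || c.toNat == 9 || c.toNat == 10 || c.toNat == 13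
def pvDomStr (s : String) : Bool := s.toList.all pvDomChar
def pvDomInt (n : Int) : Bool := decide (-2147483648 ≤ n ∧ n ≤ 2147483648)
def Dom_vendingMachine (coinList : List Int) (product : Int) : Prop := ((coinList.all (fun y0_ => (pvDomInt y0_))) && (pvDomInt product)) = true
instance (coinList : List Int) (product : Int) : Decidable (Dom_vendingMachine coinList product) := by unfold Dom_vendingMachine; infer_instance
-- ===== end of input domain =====

-- B replaces A's repeated-subtraction change loop by one divmod per denomination and the
-- coin-validation/summation loop by an any-check plus sum (objective: simpler).

-- shared constant tables (data, not algorithm)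
def pvDenoms : List Int := [200, 100, 50, 10, 5]
def pvProducts : PySem.Dict Int (String × Int) :=
  PySem.Dict.ofList [(1, ("Agua", 50)), (2, ("Coca-Cola", 100)), (4, ("Cerveza", 155)),
                     (5, ("Pizza", 200)), (10, ("Donut", 75))]
-- Python's str(list-of-ints), as used by "vuelto --> {}".format(...)
def pvReprList (xs : List Int) : String :=
  "[" ++ String.intercalate ", " (xs.map PySem.Int.toStr) ++ "]"

-- ===== PORT A =====
-- A's coin loop: first coin not in pvDenoms → none (early error return); else some (sum so far)
def pvLoopA : List Int → Int → Option Int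
  | [], money => some money
  | c :: rest, money => if c ∈ pvDenoms then pvLoopA rest (money + c) else none

-- A's while-loop: subtract acceptedMoneyValues[moneyCont] while it fits, else advance moneyCont.
-- The 'none' branch is Python's (unreachable) IndexError state: money is always a positive multiple of 5 there.
def pvChangeLoopA (money : Int) (cont : Nat) (acc : List Int) : List Int :=
  if _hm : 0 < money then
    match h : PySem.List.pyGet? pvDenoms (cont : Int) with
    | some d =>
        if 0 ≤ money - d then
          pvChangeLoopA (money - d) cont (acc ++ [d])
        else
          pvChangeLoopA money (cont + 1) acc
    | none => acc
  else acc
termination_by (money.toNat, 5 - cont)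
decreasing_by
  · have hd : (0:Int) < d := by
      have hmem := PySem.List.mem_of_pyGet?_eq_some pvDenoms h
      fin_cases hmem <;> norm_num
    left; omega
  · have hc : cont < 5 := by
      by_contra hc
      have : PySem.List.pyGet? pvDenoms (cont : Int) = none := by
        rw [PySem.List.pyGet?_eq_none_iff pvDenoms]
        simp [PySem.Raise.InRange, pvDenoms]
        omega
      simp [this] at h
    right; omega

def vendingMachine (coinList : List Int) (product : Int) : String × List Int :=
  match PySem.Dict.get? pvProducts product with
  | none => ("El producto con codigo " ++ PySem.Int.toStr product ++ " no existe", coinList)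
  | some pr =>
    match pvLoopA coinList 0 with
    | none => ("Error, se ha ingresado una moneda no permitida", coinList)
    | some money =>
      if money < pr.2 then
        ("Dinero insuficiente para realizar la compra (dinero disponible: " ++
          PySem.Int.toStr money ++ ", precio: " ++ PySem.Int.toStr pr.2 ++ ")", coinList)
      else
        let back := pvChangeLoopA (money - pr.2) 0 []
        ("Producto adquirido --> " ++ pr.1 ++ ", vuelto --> " ++ pvReprList back, back)

-- ===== PORT B =====
def vendingMachine_alt (coinList : List Int) (product : Int) : String × List Int :=
  match PySem.Dict.get? pvProducts product with
  | none => ("El producto con codigo " ++ PySem.Int.toStr product ++ " no existe", coinList)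
  | some pr =>
    if coinList.any (fun c => !(decide (c ∈ pvDenoms))) then
      ("Error, se ha ingresado una moneda no permitida", coinList)
    else
      let money := coinList.sum
      if money < pr.2 then
        ("Dinero insuficiente para realizar la compra (dinero disponible: " ++
          PySem.Int.toStr money ++ ", precio: " ++ PySem.Int.toStr pr.2 ++ ")", coinList)
      else
        let back := (pvDenoms.foldl
          (fun (st : Int × List Int) d =>
            (PySem.Int.mod st.1 d, st.2 ++ List.replicate (PySem.Int.floordiv st.1 d).toNat d))
          (money - pr.2, [])).2
        ("Producto adquirido --> " ++ pr.1 ++ ", vuelto --> " ++ pvReprList back, back)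

-- ===== PRECONDITION & SPEC =====
def Spec_vendingMachine (coinList : List Int) (product : Int) (out : String × List Int) : Prop := out = vendingMachine_alt coinList product
instance (coinList : List Int) (product : Int) (out : String × List Int) : Decidable (Spec_vendingMachine coinList product out) := by unfold Spec_vendingMachine; infer_instance

-- ===== CLAIM (what is proved, stated in full; the proofs are below) =====
def Claim_equal_vendingMachine : Prop := ∀ (coinList : List Int) (product : Int), Dom_vendingMachine coinList product → Spec_vendingMachine coinList product (vendingMachine coinList product)

-- ===== LEMMAS AND PROOFS =====

-- characterisation of A's validation/summation loop
lemma pvLoopA_eq (coins : List Int) (m : Int) :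
    pvLoopA coins m =
      if coins.all (fun c => decide (c ∈ pvDenoms)) then some (m + coins.sum) else none := by
  induction coins generalizing m with
  | nil => simp [pvLoopA]
  | cons c rest ih =>
    by_cases hc : c ∈ pvDenoms
    · simp [pvLoopA, hc, ih, add_assoc]
    · simp [pvLoopA, hc]

lemma pv_sum_dvd (coins : List Int) (h : coins.all (fun c => decide (c ∈ pvDenoms)) = true) :
    (5:Int) ∣ coins.sum := by
  induction coins with
  | nil => simp
  | cons c rest ih =>
    simp only [List.all_cons, Bool.and_eq_true, decide_eq_true_eq] at h
    have hc : (5:Int) ∣ c := by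
      have := h.1; fin_cases this <;> decide
    simpa using dvd_add hc (ih h.2)

lemma pv_price_dvd (product : Int) (pr : String × Int)
    (h : PySem.Dict.get? pvProducts product = some pr) : (5:Int) ∣ pr.2 := by
  have hp : pvProducts = PySem.Dict.mk [(1, ("Agua", 50)), (2, ("Coca-Cola", 100)),
      (4, ("Cerveza", 155)), (5, ("Pizza", 200)), (10, ("Donut", 75))] := by decide
  rw [hp] at h
  simp only [PySem.Dict.get?_mk_cons] at h
  split_ifs at h <;> cases h <;> decide

-- what B's per-denomination divmod pass produces, denomination by denomination
def pvSpec5 (m : Int) : List Int := List.replicate (PySem.Int.floordiv m 5).toNat 5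
def pvSpec10 (m : Int) : List Int :=
  List.replicate (PySem.Int.floordiv m 10).toNat 10 ++ pvSpec5 (PySem.Int.mod m 10)
def pvSpec50 (m : Int) : List Int :=
  List.replicate (PySem.Int.floordiv m 50).toNat 50 ++ pvSpec10 (PySem.Int.mod m 50)
def pvSpec100 (m : Int) : List Int :=
  List.replicate (PySem.Int.floordiv m 100).toNat 100 ++ pvSpec50 (PySem.Int.mod m 100)
def pvSpec200 (m : Int) : List Int :=
  List.replicate (PySem.Int.floordiv m 200).toNat 200 ++ pvSpec100 (PySem.Int.mod m 200)

-- one denomination of A's while-loop turns into replicate (m // d) d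
lemma pvChangeLoop_step (cont : Nat) (d : Int)
    (hget : PySem.List.pyGet? pvDenoms (cont : Int) = some d)
    (hd : 0 < d) (h5d : (5:Int) ∣ d)
    (next : Int → List Int) (hnext0 : next 0 = [])
    (hnext : ∀ m acc, 0 < m → m < d → (5:Int) ∣ m → pvChangeLoopA m (cont+1) acc = acc ++ next m) :
    ∀ m acc, 0 ≤ m → (5:Int) ∣ m →
      pvChangeLoopA m cont acc =
        acc ++ List.replicate (PySem.Int.floordiv m d).toNat d ++ next (PySem.Int.mod m d) := by
  suffices H : ∀ n (m : Int) acc, m.toNat = n → 0 ≤ m → (5:Int) ∣ m →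
      pvChangeLoopA m cont acc =
        acc ++ List.replicate (PySem.Int.floordiv m d).toNat d ++ next (PySem.Int.mod m d) by
    exact fun m acc hm h5 => H m.toNat m acc rfl hm h5
  intro n
  induction n using Nat.strong_induction_on with
  | _ n IH =>
    intro m acc hn hm h5
    rw [pvChangeLoopA]
    by_cases hpos : 0 < m
    · rw [PySem.Int.floordiv_eq_ediv_of_pos hd, PySem.Int.mod_eq_emod_of_pos hd]
      simp only [dif_pos hpos]
      split
      case h_2 heq => rw [hget] at heq; cases heq
      case h_1 d' heq =>
      rw [hget] at heq
      cases heq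
      by_cases hfit : 0 ≤ m - d
      · simp only [if_pos hfit]
        have hlt : (m - d).toNat < n := by omega
        have h5' : (5:Int) ∣ m - d := dvd_sub h5 h5d
        rw [IH _ hlt (m - d) (acc ++ [d]) rfl hfit h5']
        rw [PySem.Int.floordiv_eq_ediv_of_pos hd, PySem.Int.mod_eq_emod_of_pos hd]
        have hdiv : m / d = (m - d) / d + 1 := by
          have h := Int.add_mul_ediv_right (m - d) 1 (ne_of_gt hd)
          rw [one_mul, show m - d + d = m from by ring] at h
          exact h
        have hmod : (m - d) % d = m % d := Int.sub_emod_right m d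
        have hq : (0:Int) ≤ (m - d) / d := Int.ediv_nonneg hfit (le_of_lt hd)
        rw [hdiv, hmod]
        have : (((m - d) / d + 1)).toNat = ((m - d) / d).toNat + 1 := by omega
        rw [this, List.replicate_succ]
        simp
      · simp only [if_neg hfit]
        have hlt' : m < d := by omega
        rw [hnext m acc hpos hlt' h5]
        rw [Int.ediv_eq_zero_of_lt hm hlt', Int.emod_eq_of_lt hm hlt']
        simp
    · have hz : m = 0 := by omega
      subst hz
      simp [PySem.Int.floordiv, PySem.Int.mod, hnext0]

lemma pvLoop4 (m : Int) (acc : List Int) (hm : 0 ≤ m) (h5 : (5:Int) ∣ m) :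
    pvChangeLoopA m 4 acc = acc ++ pvSpec5 m := by
  have := pvChangeLoop_step 4 5 (by decide) (by norm_num) (by norm_num)
    (fun _ => []) rfl
    (fun m acc h1 h2 h3 => absurd (Int.le_of_dvd h1 h3) (by omega)) m acc hm h5
  simpa [pvSpec5] using this

lemma pvLoop3 (m : Int) (acc : List Int) (hm : 0 ≤ m) (h5 : (5:Int) ∣ m) :
    pvChangeLoopA m 3 acc = acc ++ pvSpec10 m := by
  have := pvChangeLoop_step 3 10 (by decide) (by norm_num) (by norm_num)
    pvSpec5 (by simp [pvSpec5, PySem.Int.floordiv])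
    (fun m acc h1 h2 h3 => pvLoop4 m acc (le_of_lt h1) h3) m acc hm h5
  simpa [pvSpec10] using this

lemma pvLoop2 (m : Int) (acc : List Int) (hm : 0 ≤ m) (h5 : (5:Int) ∣ m) :
    pvChangeLoopA m 2 acc = acc ++ pvSpec50 m := by
  have := pvChangeLoop_step 2 50 (by decide) (by norm_num) (by norm_num)
    pvSpec10 (by simp [pvSpec10, pvSpec5, PySem.Int.floordiv, PySem.Int.mod])
    (fun m acc h1 h2 h3 => pvLoop3 m acc (le_of_lt h1) h3) m acc hm h5
  simpa [pvSpec50] using this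

lemma pvLoop1 (m : Int) (acc : List Int) (hm : 0 ≤ m) (h5 : (5:Int) ∣ m) :
    pvChangeLoopA m 1 acc = acc ++ pvSpec100 m := by
  have := pvChangeLoop_step 1 100 (by decide) (by norm_num) (by norm_num)
    pvSpec50 (by simp [pvSpec50, pvSpec10, pvSpec5, PySem.Int.floordiv, PySem.Int.mod])
    (fun m acc h1 h2 h3 => pvLoop2 m acc (le_of_lt h1) h3) m acc hm h5
  simpa [pvSpec100] using this

lemma pvLoop0 (m : Int) (acc : List Int) (hm : 0 ≤ m) (h5 : (5:Int) ∣ m) :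
    pvChangeLoopA m 0 acc = acc ++ pvSpec200 m := by
  have := pvChangeLoop_step 0 200 (by decide) (by norm_num) (by norm_num)
    pvSpec100 (by simp [pvSpec100, pvSpec50, pvSpec10, pvSpec5, PySem.Int.floordiv, PySem.Int.mod])
    (fun m acc h1 h2 h3 => pvLoop1 m acc (le_of_lt h1) h3) m acc hm h5
  simpa [pvSpec200] using this

-- B's fold computes the same denomination-by-denomination decomposition
lemma pvAlt_fold_eq (m : Int) :
    (pvDenoms.foldl
      (fun (st : Int × List Int) d =>
        (PySem.Int.mod st.1 d, st.2 ++ List.replicate (PySem.Int.floordiv st.1 d).toNat d))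
      (m, [])).2 = pvSpec200 m := by
  simp [pvDenoms, List.foldl, pvSpec200, pvSpec100, pvSpec50, pvSpec10, pvSpec5,
    List.append_assoc]

theorem vendingMachine_spec : Claim_equal_vendingMachine := by
  intro coinList product _
  unfold Spec_vendingMachine vendingMachine vendingMachine_alt
  cases hpr : PySem.Dict.get? pvProducts product with
  | none => rfl
  | some pr =>
    have h5p : (5:Int) ∣ pr.2 := pv_price_dvd product pr hpr
    rw [pvLoopA_eq]
    have hany : (coinList.any fun c => !decide (c ∈ pvDenoms)) =
        !(coinList.all fun c => decide (c ∈ pvDenoms)) := by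
      rw [List.all_eq_not_any_not, Bool.not_not]
    by_cases hall : (coinList.all fun c => decide (c ∈ pvDenoms)) = true
    · simp only [hall, if_true, hany, Bool.not_true, Bool.false_eq_true, if_false, zero_add]
      by_cases hlt : coinList.sum < pr.2
      · simp [hlt]
      · simp only [if_neg hlt]
        have hm : 0 ≤ coinList.sum - pr.2 := by omega
        have h5 : (5:Int) ∣ coinList.sum - pr.2 := dvd_sub (pv_sum_dvd coinList hall) h5p
        rw [pvLoop0 _ _ hm h5, pvAlt_fold_eq]
        rfl
    · simp only [hany, if_neg hall]
      simp [hall]
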